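-- pv_equiv track=rewrite | github.com/hans0537/SSAFY_9th | SSAFY_1학기/2023-01-20_관통PJT/code/problem_f.py | yearly_movies
-- ===== SOURCE A (Python) =====
-- def yearly_movies(movies):
--     # 연도별 영화 저장할 딕셔너리 선언
--     dic = {}
--
--     for i in movies:
--         year = i.get('release_date')[:4]
--         if year in dic:
--             dic[year].append(i.get('title'))
--         else:
--             dic[year] = [i.get('title')]
--
--     return dic
-- ===== SOURCE B (Python) =====
-- def yearly_movies(movies):
--     # Two-pass grouping: collect the distinct year keys in order of first
--     # appearance, then build each year's title list with one comprehension.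
--     def year_of(m):
--         return m.get('release_date')[:4]
--
--     years = []
--     for m in movies:
--         y = year_of(m)
--         if y not in years:
--             years.append(y)
--     return {y: [m.get('title') for m in movies if year_of(m) == y] for y in years}
-- ===== Notes on version B (the rewrite author's own statement) =====
-- stated objective: alternative
-- what changed: Replaces A's single accumulating-dict pass (branching on key presence and appending in place) by a two-pass scheme: first dedup the year keys in first-appearance order, then build each year's title list with one filtering comprehension over the whole input.
-- outside the precondition, e.g. on yearly_movies([{'release_date': '2020-01-01'}]): A returns {'2020': [None]}, B returns {'2020': [None]}
import Mathlib
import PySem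

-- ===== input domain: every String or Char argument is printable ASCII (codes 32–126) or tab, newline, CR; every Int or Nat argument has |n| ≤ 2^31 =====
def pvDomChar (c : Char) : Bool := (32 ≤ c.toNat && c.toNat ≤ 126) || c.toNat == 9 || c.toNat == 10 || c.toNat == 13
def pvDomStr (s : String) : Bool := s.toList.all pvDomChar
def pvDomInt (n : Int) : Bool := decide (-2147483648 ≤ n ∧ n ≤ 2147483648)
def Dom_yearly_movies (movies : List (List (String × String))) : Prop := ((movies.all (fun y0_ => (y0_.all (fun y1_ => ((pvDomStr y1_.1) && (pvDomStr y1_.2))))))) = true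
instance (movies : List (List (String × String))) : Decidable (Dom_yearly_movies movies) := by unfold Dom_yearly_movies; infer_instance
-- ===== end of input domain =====

-- B groups titles by year with a two-pass scheme (dedup the year keys in first-appearance
-- order, then one filtering pass per key) instead of A's single accumulating-dict pass;
-- different decomposition, not faster.


-- ===== PORT A =====
-- i.get('release_date')[:4] — on Pre_ the key is present, so getD reads the stored value
def pvYear (i : List (String × String)) : String :=
  PySem.Str.slice ((PySem.Dict.ofList i).getD "release_date" "") none (some 4)

-- i.get('title') — on Pre_ the key is present
def pvTitle (i : List (String × String)) : String :=
  (PySem.Dict.ofList i).getD "title" ""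

def yearly_movies (movies : List (List (String × String))) : List (String × List String) :=
  (movies.foldl (fun dic i =>
      let year := pvYear i
      if dic.contains year then
        dic.modify year [] (fun l => l ++ [pvTitle i])   -- dic[year].append(i.get('title'))
      else
        dic.insert year [pvTitle i])                     -- dic[year] = [i.get('title')]
    PySem.Dict.empty).items

-- ===== PORT B =====
def yearly_movies_alt (movies : List (List (String × String))) : List (String × List String) :=
  let years := movies.foldl (fun ys m => PySem.Set.add ys (pvYear m)) []
  years.map (fun y => (y, (movies.filter (fun m => pvYear m == y)).map pvTitle))

-- ===== PRECONDITION & SPEC =====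
-- Pre_ excludes movies missing 'release_date' (A raises TypeError slicing None) and movies
-- missing 'title' (A returns a dict containing None, not a value of the declared str type).
def Pre_yearly_movies (movies : List (List (String × String))) : Prop :=
  (movies.all (fun m => (PySem.Dict.ofList m).contains "release_date"
                        && (PySem.Dict.ofList m).contains "title")) = true
instance (movies : List (List (String × String))) : Decidable (Pre_yearly_movies movies) := by
  unfold Pre_yearly_movies; infer_instance

def pvWitness_yearly_movies : (List (List (String × String))) :=
  [[("release_date", "2020-01-01"), ("title", "A")],
   [("release_date", "1999-05-05"), ("title", "B")],
   [("release_date", "2020-12-31"), ("title", "C")]]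

def Spec_yearly_movies (movies : List (List (String × String))) (out : List (String × List String)) : Prop := out = yearly_movies_alt movies
instance (movies : List (List (String × String))) (out : List (String × List String)) : Decidable (Spec_yearly_movies movies out) := by unfold Spec_yearly_movies; infer_instance

-- ===== CLAIM (what is proved, stated in full; the proofs are below) =====
def Claim_equal_yearly_movies : Prop := ∀ (movies : List (List (String × String))), Dom_yearly_movies movies → Pre_yearly_movies movies → Spec_yearly_movies movies (yearly_movies movies)

-- ===== LEMMAS AND PROOFS =====

-- A's branching step is exactly one modify-with-append on the year key.
theorem step_eq_modify (dic : PySem.Dict String (List String)) (i : List (String × String)) :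
    (let year := pvYear i
     if dic.contains year then dic.modify year [] (fun l => l ++ [pvTitle i])
     else dic.insert year [pvTitle i])
    = dic.modify (pvYear i) [] (fun l => l ++ [pvTitle i]) := by
  show (if dic.contains (pvYear i) then _ else _) = _
  split_ifs with h
  · rfl
  · have hm : dic.modify (pvYear i) [] (fun l => l ++ [pvTitle i])
        = dic.insert (pvYear i) ((dic.getD (pvYear i) []) ++ [pvTitle i]) :=
      PySem.Dict.ext_iff.mpr rfl
    rw [hm]
    have h' : dic.contains (pvYear i) = false := by simpa using h
    rw [PySem.Dict.getD_of_not_contains dic [] h']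
    rfl

theorem yearly_movies_spec' (movies : List (List (String × String))) :
    yearly_movies movies = yearly_movies_alt movies := by
  show
    (movies.foldl (fun dic i =>
      let year := pvYear i
      if dic.contains year then dic.modify year [] (fun l => l ++ [pvTitle i])
      else dic.insert year [pvTitle i]) PySem.Dict.empty).items
    = (movies.foldl (fun ys m => PySem.Set.add ys (pvYear m)) []).map
        (fun y => (y, (movies.filter (fun m => pvYear m == y)).map pvTitle))
  rw [show (fun (dic : PySem.Dict String (List String)) (i : List (String × String)) =>
      let year := pvYear i
      if dic.contains year then dic.modify year [] (fun l => l ++ [pvTitle i])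
      else dic.insert year [pvTitle i])
    = (fun dic i => dic.modify (pvYear i) [] (fun l => l ++ [pvTitle i])) from
      funext fun d => funext fun i => step_eq_modify d i]
  rw [show (fun (dic : PySem.Dict String (List String)) (i : List (String × String)) =>
        dic.modify (pvYear i) [] (fun l => l ++ [pvTitle i]))
      = (fun dic i => dic.modify ((fun m => (pvYear m, pvTitle m)) i).1 []
          (fun l => l ++ [((fun m => (pvYear m, pvTitle m)) i).2])) from rfl]
  rw [← List.foldl_map (f := fun m => (pvYear m, pvTitle m))
      (g := fun (dic : PySem.Dict String (List String)) p => dic.modify p.1 [] (fun l => l ++ [p.2]))]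
  have hnd : ((movies.map (fun m => (pvYear m, pvTitle m))).foldl
      (fun d p => d.modify p.1 [] (fun l => l ++ [p.2])) PySem.Dict.empty).keys.Nodup := by
    exact PySem.Dict.nodup_keys_foldl_modify_key _ Prod.fst _ _ _ (by simp)
  rw [PySem.Dict.items_eq_map_keys _ hnd []]
  rw [PySem.Dict.keys_foldl_modify_key]
  rw [← PySem.Set.update_map_eq_foldl_add]
  simp only [List.map_map, Function.comp_def, PySem.Dict.keys_empty]
  apply List.map_congr_left
  intro y hy
  rw [PySem.Dict.getD_foldl_modify_append]
  simp [List.filter_map, List.map_map, Function.comp_def]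

-- ===== VERDICT (by name: the statement is the Claim_ definition above) =====
theorem yearly_movies_spec : Claim_equal_yearly_movies := by
  intro movies _ _
  exact yearly_movies_spec' movies
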